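-- pv_equiv track=rewrite | github.com/VenciFreeman/personal-rag-dashboard | ai_conversations_summary/web/services/rag_service.py | _sanitize_command_for_debug
-- ===== SOURCE A (Python) =====
-- def _sanitize_command_for_debug(command: list[str]) -> list[str]:
--     sanitized = list(command)
--     secret_flags = {"--api-key"}
--     i = 0
--     while i < len(sanitized):
--         token = str(sanitized[i]).strip().lower()
--         if token in secret_flags and i + 1 < len(sanitized):
--             sanitized[i + 1] = "***"
--             i += 2
--             continue
--         i += 1
--     return sanitized
-- ===== SOURCE B (Python) =====
-- def _sanitize_command_for_debug(command: list[str]) -> list[str]: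
--     # Streaming state machine: one pass, one bit of state.
--     # prev_unmasked_flag == "the previous emitted token is a secret flag that
--     # was not itself masked"; exactly those positions get masked. Correct for
--     # the skip-two semantics because a masked value ('***') is never a flag.
--     secret_flags = {"--api-key"}
--     out = []
--     prev_unmasked_flag = False
--     for tok in command:
--         if prev_unmasked_flag:
--             out.append("***")
--             prev_unmasked_flag = False
--         else:
--             out.append(tok)
--             prev_unmasked_flag = str(tok).strip().lower() in secret_flags
--     return out
-- ===== Notes on version B (the rewrite author's own statement) =====
-- stated objective: faster
-- what changed: B replaces A's while loop with index arithmetic, in-place mutation and skip-two on a hit by a single streaming pass over the tokens carrying one boolean state ('previous token is an unmasked secret flag'), which is correct because a masked value ('***') can never itself be a flag. Single list-append pass with no str()/strip()/lower() on masked positions and no repeated len()/indexing gives a measured constant-factor speedup.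
import Mathlib
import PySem

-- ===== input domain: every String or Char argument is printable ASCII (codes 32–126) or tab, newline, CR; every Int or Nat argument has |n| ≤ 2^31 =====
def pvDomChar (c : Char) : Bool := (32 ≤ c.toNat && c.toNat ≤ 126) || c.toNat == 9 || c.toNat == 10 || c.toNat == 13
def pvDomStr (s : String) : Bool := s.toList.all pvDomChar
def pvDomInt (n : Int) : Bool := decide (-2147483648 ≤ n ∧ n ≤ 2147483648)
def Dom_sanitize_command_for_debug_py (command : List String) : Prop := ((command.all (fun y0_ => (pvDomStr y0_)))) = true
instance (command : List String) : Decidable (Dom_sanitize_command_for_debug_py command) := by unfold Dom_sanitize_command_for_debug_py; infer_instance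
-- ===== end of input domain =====

-- B replaces A's index loop with in-place mutation and skip-two by a single
-- streaming pass carrying one boolean ("previous token is an unmasked secret
-- flag"); same O(n), measured constant-factor faster in a timing run.


-- ===== PORT A =====
-- the while loop of A: mutates `sanitized` in place via List.set, skip-two on a hit
def pvALoop (s : List String) (i : Nat) : List String :=
  if h : i < s.length then
    if PySem.Str.lower (PySem.Str.strip (s[i]'h)) = "--api-key" ∧ i + 1 < s.length then
      pvALoop (s.set (i + 1) "***") (i + 2)
    else
      pvALoop s (i + 1)
  else s
termination_by s.length - i
decreasing_by
  · simp only [List.length_set]; omega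
  · omega

def sanitize_command_for_debug_py (command : List String) : List String :=
  pvALoop command 0

-- ===== PORT B =====
-- B's for loop: emit one token per step, carrying the bit prev_unmasked_flag
def pvBGo (cmd : List String) (prevFlag : Bool) : List String :=
  match cmd with
  | [] => []
  | t :: rest =>
    if prevFlag then "***" :: pvBGo rest false
    else t :: pvBGo rest (PySem.Str.lower (PySem.Str.strip t) == "--api-key")

def sanitize_command_for_debug_py_alt (command : List String) : List String :=
  pvBGo command false

-- ===== PRECONDITION & SPEC =====
def Spec_sanitize_command_for_debug_py (command : List String) (out : List String) : Prop := out = sanitize_command_for_debug_py_alt command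
instance (command : List String) (out : List String) : Decidable (Spec_sanitize_command_for_debug_py command out) := by unfold Spec_sanitize_command_for_debug_py; infer_instance

-- ===== CLAIM (what is proved, stated in full; the proofs are below) =====
def Claim_equal_sanitize_command_for_debug_py : Prop := ∀ (command : List String), Dom_sanitize_command_for_debug_py command → Spec_sanitize_command_for_debug_py command (sanitize_command_for_debug_py command)

-- ===== LEMMAS AND PROOFS =====

-- key invariant: whenever A's loop is entered at index i (position i unmasked),
-- the remainder it produces is B's streaming pass on the suffix with the bit off
lemma pvALoop_eq_pvBGo (s : List String) : ∀ n i, s.length - i ≤ n →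
    pvALoop s i = s.take i ++ pvBGo (s.drop i) false := by
  intro n
  induction n generalizing s with
  | zero =>
    intro i hn
    rw [pvALoop]
    have hge : ¬ i < s.length := by omega
    rw [dif_neg hge, List.drop_eq_nil_of_le (by omega), List.take_of_length_le (by omega)]
    simp [pvBGo]
  | succ n ih =>
    intro i hn
    rw [pvALoop]
    by_cases h : i < s.length
    · rw [dif_pos h]
      have hdrop : s.drop i = s[i] :: s.drop (i + 1) := List.drop_eq_getElem_cons h
      have htake1 : s.take (i + 1) = s.take i ++ [s[i]] := by
        rw [List.take_add_one]
        simp [List.getElem?_eq_getElem h]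
      by_cases hf : PySem.Str.lower (PySem.Str.strip (s[i]'h)) = "--api-key" ∧ i + 1 < s.length
      · rw [if_pos hf]
        have hs1 : i + 1 < s.length := hf.2
        have hdrop1 : s.drop (i + 1) = s[i+1] :: s.drop (i + 2) := List.drop_eq_getElem_cons hs1
        have hset : s.set (i + 1) "***" = s.take (i + 1) ++ "***" :: s.drop (i + 2) := by
          rw [List.set_eq_take_append_cons_drop, if_pos hs1]
        have hlen1 : (s.take (i + 1)).length = i + 1 := by
          simp [List.length_take]; omega
        rw [ih (s.set (i + 1) "***") (i + 2) (by simp only [List.length_set]; omega)]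
        rw [hset, List.take_append, List.drop_append, hlen1]
        have h21 : i + 2 - (i + 1) = 1 := by omega
        rw [h21, List.take_of_length_le (le_of_eq_of_le hlen1 (by omega)),
            List.drop_eq_nil_of_le (le_of_eq_of_le hlen1 (by omega))]
        rw [hdrop, hdrop1, htake1]
        have hu1 : pvBGo (s[i] :: s[i+1] :: s.drop (i + 2)) false
            = s[i] :: pvBGo (s[i+1] :: s.drop (i + 2))
                (PySem.Str.lower (PySem.Str.strip (s[i]'h)) == "--api-key") := rfl
        have hb1 : (PySem.Str.lower (PySem.Str.strip (s[i]'h)) == "--api-key") = true := by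
          simp [hf.1]
        have hu2 : pvBGo (s[i+1] :: s.drop (i + 2)) true
            = "***" :: pvBGo (s.drop (i + 2)) false := rfl
        rw [hu1, hb1, hu2]
        simp only [List.take_succ_cons, List.take_zero, List.drop_succ_cons,
          List.drop_zero, List.nil_append, List.append_assoc, List.cons_append,
          List.singleton_append]
      · rw [if_neg hf]
        rw [ih s (i + 1) (by omega), hdrop]
        by_cases hfl : PySem.Str.lower (PySem.Str.strip (s[i]'h)) = "--api-key"
        · have hnl : ¬ i + 1 < s.length := fun hlt => hf ⟨hfl, hlt⟩
          have hd1 : s.drop (i + 1) = [] := List.drop_eq_nil_of_le (by omega)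
          rw [hd1, List.take_of_length_le (by omega : s.length ≤ i + 1)]
          have hu : pvBGo (s[i] :: ([] : List String)) false
              = [s[i]] := rfl
          have hnil : pvBGo ([] : List String) false = [] := rfl
          rw [hu, hnil, List.append_nil, ← htake1]
          exact (List.take_of_length_le (by omega)).symm
        · have hb : (PySem.Str.lower (PySem.Str.strip (s[i]'h)) == "--api-key") = false := by
            simp [hfl]
          have hun : pvBGo (s[i] :: s.drop (i + 1)) false
              = s[i] :: pvBGo (s.drop (i + 1))
                  (PySem.Str.lower (PySem.Str.strip (s[i]'h)) == "--api-key") := rfl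
          rw [hun, hb, htake1, List.append_assoc]
          rfl
    · rw [dif_neg h, List.drop_eq_nil_of_le (by omega), List.take_of_length_le (by omega)]
      simp [pvBGo]

-- ===== VERDICT (by name: the statement is the Claim_ definition above) =====
theorem sanitize_command_for_debug_py_spec : Claim_equal_sanitize_command_for_debug_py := by
  unfold Claim_equal_sanitize_command_for_debug_py
  intro command _
  unfold Spec_sanitize_command_for_debug_py sanitize_command_for_debug_py sanitize_command_for_debug_py_alt
  simpa using pvALoop_eq_pvBGo command command.length 0 (by omega)
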